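-- pv_equiv track=rewrite | github.com/DenBugNBA/YandexAlgorithmsTrainings | 5. Prefix sums and two pointers (1.0)/F_Air_conditioners.py | get_power_costs
-- ===== SOURCE A (Python) =====
-- def get_power_costs(conditioners):
--     power_costs = {}
--
--     for power, price in conditioners:
--         if power not in power_costs:
--             power_costs[power] = price
--         else:
--             if price < power_costs[power]:
--                 power_costs[power] = price
--
--     return power_costs
-- ===== SOURCE B (Python) =====
-- def get_power_costs(conditioners):
--     groups = {}
--     for power, price in conditioners:
--         groups.setdefault(power, []).append(price)
--     return {power: min(prices) for power, prices in groups.items()}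
-- ===== Notes on version B (the rewrite author's own statement) =====
-- stated objective: alternative
-- what changed: Replaces the online running-minimum fold with a two-phase group-then-reduce: one pass groups all prices per power into lists, a second pass takes min of each list.
import Mathlib
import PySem

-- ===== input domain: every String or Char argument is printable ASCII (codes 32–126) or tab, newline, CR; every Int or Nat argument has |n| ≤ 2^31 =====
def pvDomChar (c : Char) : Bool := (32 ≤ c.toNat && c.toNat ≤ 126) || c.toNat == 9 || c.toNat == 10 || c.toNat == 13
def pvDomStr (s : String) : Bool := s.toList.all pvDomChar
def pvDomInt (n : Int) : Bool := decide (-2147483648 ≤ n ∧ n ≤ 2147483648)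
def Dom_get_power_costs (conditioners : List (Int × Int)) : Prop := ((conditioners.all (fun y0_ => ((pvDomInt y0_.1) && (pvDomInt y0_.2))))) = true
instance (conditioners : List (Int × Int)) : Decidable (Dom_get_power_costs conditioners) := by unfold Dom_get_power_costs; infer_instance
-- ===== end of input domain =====

-- B replaces A's online running-minimum dict with a two-phase group-then-reduce
-- (group every price per power into a list, then take min of each list): an
-- alternative decomposition of the same task, not claimed faster.

-- ===== PORT A =====
-- one loop step of A: insert if the power is new, else keep the smaller price
-- (A reads power_costs[power] only on a key known to be present; getD 0 is exact there)
def pvStepA (d : PySem.Dict Int Int) (q : Int × Int) : PySem.Dict Int Int :=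
  if d.contains q.1 = false then d.insert q.1 q.2
  else if q.2 < d.getD q.1 0 then d.insert q.1 q.2
  else d

def get_power_costs (conditioners : List (Int × Int)) : List (Int × Int) :=
  (conditioners.foldl pvStepA PySem.Dict.empty).items

-- ===== PORT B =====
-- one loop step of B: groups.setdefault(power, []).append(price)
def pvStepB (d : PySem.Dict Int (List Int)) (q : Int × Int) : PySem.Dict Int (List Int) :=
  d.modify q.1 [] (fun l => l ++ [q.2])

def get_power_costs_alt (conditioners : List (Int × Int)) : List (Int × Int) :=
  -- min(prices): every list stored in groups is nonempty, so min? is some and getD 0 is exact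
  (conditioners.foldl pvStepB PySem.Dict.empty).items.map
    (fun q => (q.1, (PySem.List.min? q.2 (fun x => x)).getD 0))

-- ===== PRECONDITION & SPEC =====
def Spec_get_power_costs (conditioners : List (Int × Int)) (out : List (Int × Int)) : Prop := out = get_power_costs_alt conditioners
instance (conditioners : List (Int × Int)) (out : List (Int × Int)) : Decidable (Spec_get_power_costs conditioners out) := by unfold Spec_get_power_costs; infer_instance

-- ===== CLAIM (what is proved, stated in full; the proofs are below) =====
def Claim_equal_get_power_costs : Prop := ∀ (conditioners : List (Int × Int)), Dom_get_power_costs conditioners → Spec_get_power_costs conditioners (get_power_costs conditioners)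

-- ===== LEMMAS AND PROOFS =====

-- A's fold computes, at each key, the running-minimum fold over the prices filed under that key
theorem pvA_get (l : List (Int × Int)) (d : PySem.Dict Int Int) (k : Int) :
    (l.foldl pvStepA d).get? k =
      ((l.filter (fun q => q.1 == k)).map (fun q => q.2)).foldl
        (fun acc x => match acc with
          | none => some x
          | some m => if x < m then some x else some m) (d.get? k) := by
  induction l generalizing d with
  | nil => rfl
  | cons q l ih =>
    rw [List.foldl_cons, ih]
    by_cases hqk : q.1 = k
    · subst hqk
      have hfil : List.filter (fun q' => q'.1 == q.1) (q :: l)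
          = q :: List.filter (fun q' => q'.1 == q.1) l := by
        simp
      rw [hfil, List.map_cons, List.foldl_cons]
      congr 1
      unfold pvStepA
      cases hc : d.contains q.1 with
      | false =>
        have hnone : d.get? q.1 = none := by
          have := PySem.Dict.contains_eq_isSome_get? d q.1
          rw [hc] at this
          exact Option.eq_none_iff_forall_ne_some.mpr
            (fun v hv => by rw [hv] at this; simp at this)
        simp [hnone]
      | true =>
        have hsome : (d.get? q.1).isSome = true := by
          rw [← PySem.Dict.contains_eq_isSome_get?]; exact hc
        obtain ⟨m, hm⟩ := Option.isSome_iff_exists.mp hsome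
        have hgd : d.getD q.1 0 = m := by
          rw [PySem.Dict.getD_eq_get?_getD, hm]; rfl
        by_cases hlt : q.2 < m
        · simp [hgd, hlt, hm]
        · simp [hgd, hlt, hm]
    · have hfil : List.filter (fun q' => q'.1 == k) (q :: l)
          = List.filter (fun q' => q'.1 == k) l := by
        simp [hqk]
      rw [hfil]
      congr 1
      unfold pvStepA
      split_ifs <;> simp [PySem.Dict.get?_insert, Ne.symm hqk]

theorem pvA_nodup (l : List (Int × Int)) (d : PySem.Dict Int Int) (h : d.keys.Nodup) :
    (l.foldl pvStepA d).keys.Nodup := by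
  induction l generalizing d with
  | nil => exact h
  | cons q l ih =>
    rw [List.foldl_cons]
    apply ih
    unfold pvStepA
    split_ifs <;> first
      | exact PySem.Dict.nodup_keys_insert d q.1 q.2 h
      | exact h

-- A's dict and B's groups dict always carry the same key sequence
theorem pvKeys_eq (l : List (Int × Int)) (d1 : PySem.Dict Int Int) (d2 : PySem.Dict Int (List Int))
    (h : d1.keys = d2.keys) :
    (l.foldl pvStepA d1).keys = (l.foldl pvStepB d2).keys := by
  induction l generalizing d1 d2 with
  | nil => exact h
  | cons q l ih =>
    rw [List.foldl_cons, List.foldl_cons]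
    apply ih
    have hcc : d1.contains q.1 = d2.contains q.1 := by
      rw [PySem.Dict.contains_eq_decide_mem_keys, PySem.Dict.contains_eq_decide_mem_keys, h]
    rw [pvStepB, PySem.Dict.keys_modify]
    unfold pvStepA
    split_ifs with h1 h2
    · have hc2 : d2.contains q.1 = false := hcc.symm.trans h1
      rw [PySem.Dict.keys_insert_of_not_contains d1 q.2 h1,
          PySem.Dict.keys_insert_of_not_contains d2 _ hc2, h]
    · have hc1 : d1.contains q.1 = true := by
        revert h1; cases d1.contains q.1 <;> simp
      have hc2 : d2.contains q.1 = true := hcc.symm.trans hc1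
      rw [PySem.Dict.keys_insert_of_contains d1 q.2 hc1,
          PySem.Dict.keys_insert_of_contains d2 _ hc2]
      exact h
    · have hc1 : d1.contains q.1 = true := by
        revert h1; cases d1.contains q.1 <;> simp
      have hc2 : d2.contains q.1 = true := hcc.symm.trans hc1
      rw [PySem.Dict.keys_insert_of_contains d2 _ hc2]
      exact h

-- each group list is exactly the filtered price list of its key
theorem pvB_getD (l : List (Int × Int)) (k : Int) :
    (l.foldl pvStepB PySem.Dict.empty).getD k []
      = (l.filter (fun q => q.1 == k)).map (fun q => q.2) := by
  have h := PySem.Dict.getD_foldl_modify_append l PySem.Dict.empty k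
  rw [PySem.Dict.getD_empty] at h
  simpa [pvStepB] using h

theorem pvB_nodup (l : List (Int × Int)) :
    (l.foldl pvStepB PySem.Dict.empty).keys.Nodup := by
  have h := PySem.Dict.nodup_keys_foldl_modify_key l (fun q : Int × Int => q.1) []
    (fun _ q => fun v => v ++ [q.2]) PySem.Dict.empty (by simp [PySem.Dict.keys_empty])
  simpa [pvStepB] using h

-- ===== VERDICT (by name: the statement is the Claim_ definition above) =====
theorem get_power_costs_spec : Claim_equal_get_power_costs := by
  intro l _
  show get_power_costs l = get_power_costs_alt l
  unfold get_power_costs get_power_costs_alt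
  have hA := PySem.Dict.items_eq_map_keys (l.foldl pvStepA PySem.Dict.empty)
    (pvA_nodup l PySem.Dict.empty (by simp [PySem.Dict.keys_empty])) 0
  have hB := PySem.Dict.items_eq_map_keys (l.foldl pvStepB PySem.Dict.empty)
    (pvB_nodup l) []
  rw [hA, hB, List.map_map]
  rw [pvKeys_eq l PySem.Dict.empty PySem.Dict.empty (by rw [PySem.Dict.keys_empty, PySem.Dict.keys_empty])]
  apply List.map_congr_left
  intro k _
  simp only [Function.comp]
  congr 1
  rw [PySem.Dict.getD_eq_get?_getD, pvA_get, PySem.Dict.get?_empty, pvB_getD,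
    PySem.List.min?]
  congr 1
  apply List.foldl_ext
  intro acc x _
  cases acc <;> rfl
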